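-- pv_equiv track=rewrite | github.com/JonoChadwell/snake | supercellerator.py | supercellerate
-- ===== SOURCE A (Python) =====
-- def supercell(pos):
--     """Return the position of the supercell containing a position."""
--     return tuple([x - x % 2 for x in pos])
--
-- def supercellerate(snake):
--     """Convert from snake representation to supercell path representation.
--     """
--     current = (supercell(snake[0]), [])
--     result = [current]
--     for x in snake:
--         if supercell(x) == current[0]:
--             current[1].insert(0, x)
--         else:
--             current = (supercell(x), [x])
--             result.append(current)
--
--     return result
-- ===== SOURCE B (Python) =====
-- def supercell(pos):
--     """Return the position of the supercell containing a position."""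
--     return tuple([x - x % 2 for x in pos])
--
-- def supercellerate(snake):
--     """Convert from snake representation to supercell path representation.
--
--     Recursive decomposition: peel off the leading run of positions sharing a
--     supercell, emit it as a reversed slice, and recurse on the remainder.
--     """
--     k = supercell(snake[0])
--     i = 1
--     while i < len(snake) and supercell(snake[i]) == k:
--         i += 1
--     result = [(k, snake[:i][::-1])]
--     if i < len(snake):
--         result += supercellerate(snake[i:])
--     return result
-- ===== Notes on version B (the rewrite author's own statement) =====
-- stated objective: alternative
-- what changed: B replaces A's single accumulator loop that mutates the current group via insert(0,...) with a recursive decomposition: it scans the leading run of one supercell, emits it as a reversed slice, and recurses on the rest.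
import Mathlib
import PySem

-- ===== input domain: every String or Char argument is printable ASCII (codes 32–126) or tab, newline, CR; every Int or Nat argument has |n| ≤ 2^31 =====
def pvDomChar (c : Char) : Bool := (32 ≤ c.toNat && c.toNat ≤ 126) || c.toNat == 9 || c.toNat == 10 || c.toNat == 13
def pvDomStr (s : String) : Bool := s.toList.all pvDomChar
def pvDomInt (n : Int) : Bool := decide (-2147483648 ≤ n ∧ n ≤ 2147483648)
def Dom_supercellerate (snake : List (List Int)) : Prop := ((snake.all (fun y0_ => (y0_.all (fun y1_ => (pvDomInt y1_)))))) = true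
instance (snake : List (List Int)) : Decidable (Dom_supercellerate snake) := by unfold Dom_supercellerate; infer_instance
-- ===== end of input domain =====

-- B is a recursive run-peeling decomposition (reversed slices) instead of A's
-- mutating accumulator loop; equal return values on all non-empty inputs.

-- ===== PORT A =====
-- supercell: tuple([x - x % 2 for x in pos])  (Python %: PySem.Int.mod)
def pvSupercell (pos : List Int) : List Int :=
  pos.map (fun x => x - PySem.Int.mod x 2)

-- A's loop state: Python's `result` holds references to `current`, whose list is
-- mutated by insert(0, x); modelled as (finished groups, current group), with
-- the current group appended at the end.
def pvStepA (acc : List (List Int × List (List Int)) × (List Int × List (List Int)))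
    (x : List Int) : List (List Int × List (List Int)) × (List Int × List (List Int)) :=
  if pvSupercell x = acc.2.1 then (acc.1, (acc.2.1, x :: acc.2.2))
  else (acc.1 ++ [acc.2], (pvSupercell x, [x]))

def supercellerate (snake : List (List Int)) : List (List Int × List (List Int)) :=
  match snake with
  | [] => []  -- Python raises IndexError on snake[0]; excluded by Pre_
  | h :: _ =>
    let st := snake.foldl pvStepA ([], (pvSupercell h, []))
    st.1 ++ [st.2]

-- ===== PORT B =====
-- B's while loop counting i over the leading run of supercell k, then the
-- reversed slice snake[:i][::-1] and recursion on snake[i:], is transcribed as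
-- takeWhile/dropWhile on the tail.
def supercellerate_alt : List (List Int) → List (List Int × List (List Int))
  | [] => []  -- Python raises IndexError on snake[0]; excluded by Pre_
  | h :: t =>
    let k := pvSupercell h
    let seg := t.takeWhile (fun x => pvSupercell x = k)
    let rest := t.dropWhile (fun x => pvSupercell x = k)
    (k, (h :: seg).reverse) :: (if rest.isEmpty then [] else supercellerate_alt rest)
termination_by snake => snake.length
decreasing_by
  simp only [List.length_cons]
  exact Nat.lt_succ_of_le (List.length_dropWhile_le _ _)

-- ===== PRECONDITION & SPEC =====
-- Pre_ excludes only the empty list, on which both Pythons raise IndexError.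
def Pre_supercellerate (snake : List (List Int)) : Prop := snake ≠ []
instance (snake : List (List Int)) : Decidable (Pre_supercellerate snake) := by
  unfold Pre_supercellerate; infer_instance
def pvWitness_supercellerate : List (List Int) := [[0, 1], [2, 3]]
def Spec_supercellerate (snake : List (List Int)) (out : List (List Int × List (List Int))) : Prop := out = supercellerate_alt snake
instance (snake : List (List Int)) (out : List (List Int × List (List Int))) : Decidable (Spec_supercellerate snake out) := by unfold Spec_supercellerate; infer_instance

-- ===== CLAIM (what is proved, stated in full; the proofs are below) =====
def Claim_equal_supercellerate : Prop := ∀ (snake : List (List Int)), Dom_supercellerate snake → Pre_supercellerate snake → Spec_supercellerate snake (supercellerate snake)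

-- ===== LEMMAS AND PROOFS =====

-- Functional view of A's loop tail: process xs with current group (k, g).
def pvAux (k : List Int) (g : List (List Int)) : List (List Int) → List (List Int × List (List Int))
  | [] => [(k, g)]
  | x :: rest =>
    if pvSupercell x = k then pvAux k (x :: g) rest
    else (k, g) :: pvAux (pvSupercell x) [x] rest

theorem pvFoldA_eq_aux (xs : List (List Int)) :
    ∀ (done : List (List Int × List (List Int))) (k : List Int) (g : List (List Int)),
      (xs.foldl pvStepA (done, (k, g))).1 ++ [(xs.foldl pvStepA (done, (k, g))).2]
        = done ++ pvAux k g xs := by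
  induction xs with
  | nil => intro done k g; simp [pvAux]
  | cons x rest ih =>
    intro done k g
    by_cases h : pvSupercell x = k
    · simp [pvAux, pvStepA, h, ih]
    · simp [pvAux, pvStepA, h, ih]

theorem pvAux_eq_alt (xs : List (List Int)) :
    ∀ (k : List Int) (g : List (List Int)),
      pvAux k g xs
        = (k, (xs.takeWhile (fun x => pvSupercell x = k)).reverse ++ g)
          :: (let r := xs.dropWhile (fun x => pvSupercell x = k);
              if r.isEmpty then [] else supercellerate_alt r) := by
  induction xs with
  | nil => intro k g; simp [pvAux]
  | cons x rest ih =>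
    intro k g
    by_cases h : pvSupercell x = k
    · simp only [pvAux, ih, List.takeWhile_cons, List.dropWhile_cons, h,
        decide_true, if_true]
      simp
    · simp only [pvAux, if_neg h, List.takeWhile_cons, List.dropWhile_cons]
      simp only [h, decide_false, List.reverse_nil, List.nil_append,
        List.isEmpty_cons, if_neg (by simp : ¬ (false = true))]
      congr 1
      rw [supercellerate_alt]
      simp [ih]

-- ===== VERDICT (by name: the statement is the Claim_ definition above) =====
theorem supercellerate_spec : Claim_equal_supercellerate := by
  intro snake _ hpre
  unfold Spec_supercellerate
  match snake with
  | [] => exact absurd rfl hpre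
  | h :: t =>
    show (((h :: t).foldl pvStepA ([], (pvSupercell h, []))).1
        ++ [((h :: t).foldl pvStepA ([], (pvSupercell h, []))).2]) = _
    rw [pvFoldA_eq_aux]
    simp only [List.nil_append]
    show pvAux (pvSupercell h) [] (h :: t) = _
    rw [pvAux]
    rw [if_pos rfl]
    rw [pvAux_eq_alt]
    rw [supercellerate_alt]
    simp
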